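-- pv_equiv track=rewrite | github.com/Scrappyz/auto-input | project/autoinput.py | parse
-- ===== SOURCE A (Python) =====
-- def parse(hotkey: str) -> list:
--     exclude = {' ', '+'}
--     keys = []
--     key = ""
--     length = len(hotkey)
--     for i in range(length):
--         ch = hotkey[i]
--         if ch not in exclude:
--             key += ch
--             continue
--
--         if key:
--             keys.append(key)
--             key = ""
--
--     if key:
--         keys.append(key)
--     return keys
-- ===== SOURCE B (Python) =====
-- def parse(hotkey: str) -> list:
--     delim = {' ', '+'}
--     n = len(hotkey)
--     starts = [i for i in range(n)
--               if hotkey[i] not in delim and (i == 0 or hotkey[i - 1] in delim)]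
--     ends = [i + 1 for i in range(n)
--             if hotkey[i] not in delim and (i == n - 1 or hotkey[i + 1] in delim)]
--     return [hotkey[s:e] for s, e in zip(starts, ends)]
-- ===== Notes on version B (the rewrite author's own statement) =====
-- stated objective: alternative
-- what changed: B replaces A's single accumulator loop (grow key, flush on delimiter) by boundary detection: two index comprehensions compute the token start positions and token end positions, and the result is the string slices between paired boundaries.
import Mathlib
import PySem

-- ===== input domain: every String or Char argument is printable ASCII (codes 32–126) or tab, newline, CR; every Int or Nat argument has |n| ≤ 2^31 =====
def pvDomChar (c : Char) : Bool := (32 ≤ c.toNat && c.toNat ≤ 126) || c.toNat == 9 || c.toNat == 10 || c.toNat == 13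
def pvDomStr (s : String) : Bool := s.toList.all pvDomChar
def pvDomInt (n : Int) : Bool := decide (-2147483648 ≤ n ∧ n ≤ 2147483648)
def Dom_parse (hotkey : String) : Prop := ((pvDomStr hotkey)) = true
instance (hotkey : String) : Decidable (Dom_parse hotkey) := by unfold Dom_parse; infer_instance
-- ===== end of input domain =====

-- B replaces A's accumulator loop (grow key, flush on ' '/'+') by boundary detection:
-- two index passes compute token start and end positions, then the slices between paired
-- boundaries are returned ("alternative": same O(n) cost, different decomposition).

-- ===== PORT A =====
-- Python strings handled as List Char; `key += ch` is `key ++ [c]`, joined to String at the end.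
def pvParseGo : List Char → List (List Char) → List Char → List (List Char)
  | [], keys, key => if key ≠ [] then keys ++ [key] else keys
  | c :: rest, keys, key =>
    if ¬ (c = ' ' ∨ c = '+') then pvParseGo rest keys (key ++ [c])
    else if key ≠ [] then pvParseGo rest (keys ++ [key]) []
    else pvParseGo rest keys key

def parse (hotkey : String) : List String :=
  (pvParseGo hotkey.toList [] []).map String.mk

-- ===== PORT B =====
def pvDelim (c : Char) : Bool := c == ' ' || c == '+'

-- `i == 0 or hotkey[i-1] in delim`: for i = 0 the Python short-circuits; the guarded
-- getD value is ORed with `true` there, so the Bool value is the same.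
def pvStartPred (l : List Char) (i : Nat) : Bool :=
  !pvDelim (l.getD i ' ') && (decide (i = 0) || pvDelim (l.getD (i - 1) ' '))

-- `i == n-1 or hotkey[i+1] in delim`: likewise guarded for i = n-1.
def pvEndPred (l : List Char) (n : Nat) (i : Nat) : Bool :=
  !pvDelim (l.getD i ' ') && (decide (i = n - 1) || pvDelim (l.getD (i + 1) ' '))

-- `hotkey[s:e]` with 0 ≤ s and 0 ≤ e ≤ n is exactly take (e - s) ∘ drop s.
def parse_alt (hotkey : String) : List String :=
  ((((List.range hotkey.toList.length).filter (pvStartPred hotkey.toList)).zip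
      (((List.range hotkey.toList.length).filter
          (pvEndPred hotkey.toList hotkey.toList.length)).map (· + 1))).map
    (fun p => String.mk ((hotkey.toList.drop p.1).take (p.2 - p.1))))

-- ===== PRECONDITION & SPEC =====
def Spec_parse (hotkey : String) (out : List String) : Prop := out = parse_alt hotkey
instance (hotkey : String) (out : List String) : Decidable (Spec_parse hotkey out) := by unfold Spec_parse; infer_instance

-- ===== CLAIM (what is proved, stated in full; the proofs are below) =====
def Claim_equal_parse : Prop := ∀ (hotkey : String), Dom_parse hotkey → Spec_parse hotkey (parse hotkey)

-- ===== LEMMAS AND PROOFS =====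

def pvKey (c : Char) : Bool := !pvDelim c

-- the canonical tokenizer both ports are reduced to
def pvGroups : List Char → List (List Char)
  | [] => []
  | c :: cs =>
    if pvKey c then (c :: cs.takeWhile pvKey) :: pvGroups (cs.dropWhile pvKey)
    else pvGroups cs
termination_by l => l.length
decreasing_by
  · exact Nat.lt_succ_of_le (List.length_dropWhile_le ..)
  · exact Nat.lt_succ_self _

-- ---- A-side: accumulator loop = pvGroups ----
def pvPend (key : List Char) (l : List Char) : List (List Char) :=
  if key ++ l.takeWhile pvKey = [] then pvGroups (l.dropWhile pvKey)
  else (key ++ l.takeWhile pvKey) :: pvGroups (l.dropWhile pvKey)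

theorem pvPend_nil (l : List Char) : pvPend [] l = pvGroups l := by
  cases l with
  | nil => simp [pvPend, pvGroups]
  | cons c cs =>
    by_cases h : pvKey c = true
    · rw [pvPend, List.takeWhile_cons_of_pos h, List.dropWhile_cons_of_pos h]
      simp [pvGroups, h]
    · rw [pvPend, List.takeWhile_cons_of_neg h, List.dropWhile_cons_of_neg h]
      simp [pvGroups, h]

theorem pvKey_iff (c : Char) : pvKey c = true ↔ ¬ (c = ' ' ∨ c = '+') := by
  simp [pvKey, pvDelim]

theorem pvParseGo_pend (l : List Char) :
    ∀ keys key, pvParseGo l keys key = keys ++ pvPend key l := by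
  induction l with
  | nil =>
    intro keys key
    cases key <;> simp [pvParseGo, pvPend, pvGroups]
  | cons c cs ih =>
    intro keys key
    by_cases h : pvKey c = true
    · have h' : ¬ (c = ' ' ∨ c = '+') := (pvKey_iff c).mp h
      rw [pvParseGo, if_pos h', ih]
      unfold pvPend
      rw [List.takeWhile_cons_of_pos h, List.dropWhile_cons_of_pos h]
      simp
    · have h' : (c = ' ' ∨ c = '+') := by
        by_contra hc; exact h ((pvKey_iff c).mpr hc)
      have hg : pvGroups (c :: cs) = pvGroups cs := by
        rw [pvGroups, if_neg h]
      rw [pvParseGo, if_neg (not_not_intro h')]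
      unfold pvPend
      rw [List.takeWhile_cons_of_neg h, List.dropWhile_cons_of_neg h, hg]
      cases key with
      | nil => simp [ih, pvPend_nil]
      | cons k ks =>
        rw [if_pos (by simp), ih, pvPend_nil]
        simp

theorem parse_groups (hotkey : String) :
    parse hotkey = (pvGroups hotkey.toList).map String.mk := by
  unfold parse
  rw [pvParseGo_pend, pvPend_nil]
  simp

-- ---- B-side: boundary lists = pvGroups ----

-- start predicate with explicit previous character
def pvsP (p : Char) (l : List Char) (i : Nat) : Bool :=
  !pvDelim (l.getD i ' ') && pvDelim ((p :: l).getD i ' ')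

def pveP (l : List Char) (i : Nat) : Bool :=
  !pvDelim (l.getD i ' ') && pvDelim (l.getD (i + 1) ' ')

def pvS (p : Char) (l : List Char) : List Nat := (List.range l.length).filter (pvsP p l)
def pvE (l : List Char) : List Nat := (List.range l.length).filter (pveP l)

def pvToks (l : List Char) : List (List Char) :=
  ((pvS ' ' l).zip ((pvE l).map (· + 1))).map (fun p => (l.drop p.1).take (p.2 - p.1))

theorem startPred_eq (l : List Char) : pvStartPred l = pvsP ' ' l := by
  funext i
  cases i with
  | zero => simp [pvStartPred, pvsP, pvDelim]
  | succ j => simp [pvStartPred, pvsP]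

theorem endPred_eq (l : List Char) :
    (List.range l.length).filter (pvEndPred l l.length) = (List.range l.length).filter (pveP l) := by
  apply List.filter_congr
  intro i hi
  rw [List.mem_range] at hi
  unfold pvEndPred pveP
  by_cases h : i = l.length - 1
  · have : l.length ≤ i + 1 := by omega
    rw [List.getD_eq_default _ _ this]
    simp [h, pvDelim]
  · have : i + 1 < l.length := by omega
    simp [h]

theorem parse_alt_toks (hotkey : String) :
    parse_alt hotkey = (pvToks hotkey.toList).map String.mk := by
  unfold parse_alt pvToks pvS pvE
  rw [startPred_eq, endPred_eq]
  simp [List.map_map, Function.comp]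

-- shift recurrences
theorem pvS_cons (p c : Char) (cs : List Char) :
    pvS p (c :: cs) = (if pvKey c && pvDelim p then [0] else []) ++ (pvS c cs).map (· + 1) := by
  unfold pvS
  rw [show (c :: cs).length = cs.length + 1 from rfl, List.range_succ_eq_map, List.filter_cons,
    List.filter_map]
  have hfun : (pvsP p (c :: cs)) ∘ Nat.succ = pvsP c cs := by
    funext i; simp [pvsP, Function.comp]
  rw [hfun]
  have h0 : pvsP p (c :: cs) 0 = (pvKey c && pvDelim p) := by
    simp [pvsP, pvKey]
  rw [h0]
  cases hb : (pvKey c && pvDelim p) <;> simp [hb]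

theorem pvE_cons (c : Char) (cs : List Char) :
    pvE (c :: cs) = (if pvKey c && pvDelim (cs.getD 0 ' ') then [0] else []) ++ (pvE cs).map (· + 1) := by
  unfold pvE
  rw [show (c :: cs).length = cs.length + 1 from rfl, List.range_succ_eq_map, List.filter_cons,
    List.filter_map]
  have hfun : (pveP (c :: cs)) ∘ Nat.succ = pveP cs := by
    funext i; simp [pveP, Function.comp]
  rw [hfun]
  have h0 : pveP (c :: cs) 0 = (pvKey c && pvDelim (cs.getD 0 ' ')) := by
    simp [pveP, pvKey]
  rw [h0]
  cases hb : (pvKey c && pvDelim (cs.getD 0 ' ')) <;> simp [hb]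

-- the previous character only matters through pvDelim, and not at all if l starts with a delimiter
theorem pvS_congr (p q : Char) (l : List Char) (h : pvDelim p = pvDelim q) : pvS p l = pvS q l := by
  unfold pvS
  congr 1
  funext i
  cases i with
  | zero => simp [pvsP, h]
  | succ j => simp [pvsP]

theorem pvS_irrel (p q : Char) (l : List Char) (h : pvDelim (l.getD 0 ' ') = true) :
    pvS p l = pvS q l := by
  unfold pvS
  congr 1
  funext i
  cases i with
  | zero => unfold pvsP; rw [h]; simp
  | succ j => simp [pvsP]

theorem headD_dropWhile (l : List Char) :
    pvDelim ((l.dropWhile pvKey).getD 0 ' ') = true := by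
  induction l with
  | nil => decide
  | cons x xs ih =>
    by_cases h : pvKey x = true
    · rw [List.dropWhile_cons_of_pos h]; exact ih
    · rw [List.dropWhile_cons_of_neg h]
      simp [pvKey] at h
      simpa using h

theorem pvS_run (d : List Char) (hd : pvDelim (d.getD 0 ' ') = true) :
    ∀ (t : List Char) (p : Char), pvDelim p = false → (∀ x ∈ t, pvKey x = true) →
      pvS p (t ++ d) = (pvS ' ' d).map (· + t.length) := by
  intro t
  induction t with
  | nil =>
    intro p _ _
    simpa using pvS_irrel p ' ' d hd
  | cons x t' ih =>
    intro p hp ht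
    have hx : pvKey x = true := ht x (by simp)
    have hx' : pvDelim x = false := by simpa [pvKey] using hx
    rw [List.cons_append, pvS_cons, hp]
    simp only [Bool.and_false, Bool.false_eq_true, if_false, List.nil_append]
    rw [ih x hx' (fun y hy => ht y (by simp [hy]))]
    simp only [List.map_map, List.length_cons]
    apply List.map_congr_left
    intro a _
    simp only [Function.comp_apply]
    omega

theorem pvE_run (d : List Char) (hd : pvDelim (d.getD 0 ' ') = true) :
    ∀ (t : List Char), t ≠ [] → (∀ x ∈ t, pvKey x = true) →
      pvE (t ++ d) = (t.length - 1) :: (pvE d).map (· + t.length) := by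
  intro t
  induction t with
  | nil => intro h; exact absurd rfl h
  | cons x t' ih =>
    intro _ ht
    have hx : pvKey x = true := ht x (by simp)
    cases t' with
    | nil =>
      rw [List.cons_append, List.nil_append, pvE_cons, hx]
      simp only [List.getD] at hd
      simp [hd]
    | cons y t'' =>
      have hy : pvKey y = true := ht y (by simp)
      rw [List.cons_append, pvE_cons]
      have h0 : ((y :: t'' ++ d).getD 0 ' ') = y := rfl
      rw [h0]
      have hy' : pvDelim y = false := by simpa [pvKey] using hy
      simp only [hy', Bool.and_false, Bool.false_eq_true, if_false, List.nil_append]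
      rw [ih (by simp) (fun z hz => ht z (by simp [hz]))]
      simp only [List.map_cons, List.map_map, List.length_cons]
      refine List.cons_eq_cons.mpr ⟨by omega, ?_⟩
      apply List.map_congr_left
      intro a _
      simp only [Function.comp_apply]
      omega

-- dropping a common offset from both boundary lists drops the corresponding prefix from the list
theorem toks_shift (x l : List Char) (S E : List Nat) :
    (((S.map (· + x.length)).zip ((E.map (· + x.length)).map (· + 1))).map
        (fun p => ((x ++ l).drop p.1).take (p.2 - p.1)))
      = ((S.zip (E.map (· + 1))).map (fun p => (l.drop p.1).take (p.2 - p.1))) := by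
  have hE : (E.map (· + x.length)).map (· + 1) = (E.map (· + 1)).map (· + x.length) := by
    simp only [List.map_map]
    apply List.map_congr_left
    intro e _
    simp only [Function.comp_apply]
    omega
  rw [hE, List.zip_map, List.map_map]
  apply List.map_congr_left
  intro p _
  simp only [Function.comp, Prod.map]
  have h1 : (x ++ l).drop (p.1 + x.length) = l.drop p.1 := by
    rw [Nat.add_comm, List.drop_append, List.drop_eq_nil_of_le (Nat.le_add_right _ _),
      Nat.add_sub_cancel_left, List.nil_append]
  have h2 : p.2 + x.length - (p.1 + x.length) = p.2 - p.1 := by omega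
  rw [h1, h2]

theorem pvToks_eq (l : List Char) : pvToks l = pvGroups l := by
  match l with
  | [] => simp [pvToks, pvS, pvE, pvGroups]
  | c :: cs =>
    by_cases hk : pvKey c = true
    · -- run case: first token is c :: takeWhile pvKey cs
      have hsplit : cs = cs.takeWhile pvKey ++ cs.dropWhile pvKey :=
        (List.takeWhile_append_dropWhile).symm
      have hd : pvDelim ((cs.dropWhile pvKey).getD 0 ' ') = true := headD_dropWhile cs
      have htk : ∀ x ∈ cs.takeWhile pvKey, pvKey x = true :=
        fun x hx => List.mem_takeWhile_imp hx
      have hc' : pvDelim c = false := by simpa [pvKey] using hk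
      have heq : c :: cs = (c :: cs.takeWhile pvKey) ++ cs.dropWhile pvKey := by
        rw [List.cons_append, ← hsplit]
      have hall : ∀ x ∈ c :: cs.takeWhile pvKey, pvKey x = true := by
        intro x hx
        rcases List.mem_cons.mp hx with h | h
        · rw [h]; exact hk
        · exact htk x h
      have hS : pvS ' ' (c :: cs)
          = 0 :: ((pvS ' ' (cs.dropWhile pvKey)).map (· + (cs.takeWhile pvKey).length)).map (· + 1) := by
        conv_lhs => rw [hsplit]
        rw [pvS_cons, hk, show pvDelim ' ' = true from rfl,
          pvS_run (cs.dropWhile pvKey) hd (cs.takeWhile pvKey) c hc' htk]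
        simp
      have hE : pvE (c :: cs)
          = (cs.takeWhile pvKey).length
              :: (pvE (cs.dropWhile pvKey)).map (· + ((cs.takeWhile pvKey).length + 1)) := by
        rw [heq, pvE_run (cs.dropWhile pvKey) hd (c :: cs.takeWhile pvKey) (by simp) hall]
        simp
      rw [pvGroups, if_pos hk]
      rw [← pvToks_eq (cs.dropWhile pvKey)]
      unfold pvToks
      rw [hS, hE]
      simp only [List.map_cons, List.zip_cons_cons, List.map_cons]
      refine List.cons_eq_cons.mpr ⟨?_, ?_⟩
      · -- head token
        rw [heq]
        simp only [Nat.sub_zero, List.drop_zero]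
        rw [show (cs.takeWhile pvKey).length + 1 = (c :: cs.takeWhile pvKey).length from rfl,
          List.take_left]
      · -- tail tokens
        have hshift := toks_shift (c :: cs.takeWhile pvKey) (cs.dropWhile pvKey)
          (pvS ' ' (cs.dropWhile pvKey)) (pvE (cs.dropWhile pvKey))
        rw [show (c :: cs.takeWhile pvKey).length = (cs.takeWhile pvKey).length + 1 from rfl,
          ← heq] at hshift
        have hSmap : (pvS ' ' (cs.dropWhile pvKey)).map (· + ((cs.takeWhile pvKey).length + 1))
            = ((pvS ' ' (cs.dropWhile pvKey)).map (· + (cs.takeWhile pvKey).length)).map (· + 1) := by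
          simp only [List.map_map]
          apply List.map_congr_left
          intro s _
          simp only [Function.comp_apply]
          omega
        rw [hSmap] at hshift
        exact hshift
    · -- delimiter head: everything shifts by one
      have hkf : pvKey c = false := by
        cases h : pvKey c
        · rfl
        · exact absurd h hk
      have hc' : pvDelim c = true := by simpa [pvKey] using hkf
      have hS : pvS ' ' (c :: cs) = (pvS ' ' cs).map (· + 1) := by
        rw [pvS_cons, hkf]
        simp only [Bool.false_and, Bool.false_eq_true, if_false, List.nil_append]
        rw [pvS_congr c ' ' cs (by rw [hc']; rfl)]
      have hE : pvE (c :: cs) = (pvE cs).map (· + 1) := by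
        rw [pvE_cons, hkf]
        simp
      rw [pvGroups, if_neg hk, ← pvToks_eq cs]
      unfold pvToks
      rw [hS, hE]
      have hshift := toks_shift [c] cs (pvS ' ' cs) (pvE cs)
      simp only [List.length_cons, List.length_nil, Nat.zero_add, List.singleton_append] at hshift
      exact hshift
termination_by l.length
decreasing_by
  · exact Nat.lt_succ_of_le (List.length_dropWhile_le ..)
  · exact Nat.lt_succ_self _

-- ===== VERDICT (by name: the statement is the Claim_ definition above) =====
theorem parse_spec : Claim_equal_parse := by
  intro hotkey _
  unfold Spec_parse
  rw [parse_groups, parse_alt_toks, pvToks_eq]
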